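-- pv_equiv track=rewrite | github.com/aquastripe/problem-solving | atcoder/beginner_contest/40/400/C.py | method_3
-- ===== SOURCE A (Python) =====
-- def method_3(n):
--     ans = 0
--     pow_2 = [2 ** i for i in range(64)]
--     for a in range(1, 64):
--         good_integer = pow_2[a] * 1
--         if good_integer > n:
--             break
--
--         lb, ub = 1, 10 ** 9
--         while ub - lb > 1:
--             mid = (lb + ub) // 2
--             good_integer = pow_2[a] * mid * mid
--             if good_integer > n:
--                 ub = mid
--             else:
--                 lb = mid
--
--         ans += (lb + 1) // 2
--     return ans
-- ===== SOURCE B (Python) =====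
-- def method_3(n):
--     # Loop order swapped: iterate over odd bases b, count exponents a>=1 with 2**a * b*b <= n
--     # by repeated halving of n // (b*b). No binary search needed.
--     ans = 0
--     b = 1
--     while 2 * b * b <= n:
--         m = n // (b * b)
--         while m > 1:
--             m //= 2
--             ans += 1
--         b += 2
--     return ans
-- ===== Notes on version B (the rewrite author's own statement) =====
-- stated objective: alternative
-- what changed: Loop order swapped: instead of binary-searching, per power 2^a, the largest square factor, B iterates over odd bases b and counts the valid exponents a by repeated halving of n // (b*b); the binary search disappears entirely.
import Mathlib
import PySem

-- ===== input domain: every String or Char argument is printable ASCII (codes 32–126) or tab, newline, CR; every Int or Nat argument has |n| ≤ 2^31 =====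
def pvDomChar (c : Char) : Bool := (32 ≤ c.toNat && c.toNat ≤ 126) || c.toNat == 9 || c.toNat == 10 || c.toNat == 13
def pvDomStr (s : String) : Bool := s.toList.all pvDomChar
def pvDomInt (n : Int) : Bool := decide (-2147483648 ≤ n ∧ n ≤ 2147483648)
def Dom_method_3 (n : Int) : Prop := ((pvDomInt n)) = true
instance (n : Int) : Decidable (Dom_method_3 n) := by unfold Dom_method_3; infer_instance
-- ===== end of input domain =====

-- B swaps the loop order: it iterates over odd bases b and counts the exponents a by repeated
-- halving of n // (b*b), removing A's inner binary search (alternative algorithm, similar cost).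

-- ===== PORT A =====
-- pow_2 = [2 ** i for i in range(64)]
def method3_pow2 : List Int := (PySem.List.pyRange 0 64 1).map (fun i => (2:Int) ^ i.toNat)

-- needed by the binary-search recursion below (mid strictly between lb and ub)
theorem method3_mid_lt {lb ub : Int} (h : ub - lb > 1) :
    lb < PySem.Int.floordiv (lb + ub) 2 ∧ PySem.Int.floordiv (lb + ub) 2 < ub := by
  rw [PySem.Int.floordiv_eq_ediv_of_pos (by omega : (0:Int) < 2)]
  omega

-- the inner `while ub - lb > 1` binary search of A, returning the final lb
def method3_bs (n base lb ub : Int) : Int :=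
  if h : ub - lb > 1 then
    let mid := PySem.Int.floordiv (lb + ub) 2
    if base * mid * mid > n then method3_bs n base lb mid
    else method3_bs n base mid ub
  else lb
termination_by (ub - lb).toNat
decreasing_by
  · have := method3_mid_lt h; omega
  · have := method3_mid_lt h; omega

-- the `for a in range(1, 64)` loop with its break
def method3_outer (n : Int) (a : Nat) (ans : Int) : Int :=
  if _h : a < 64 then
    let gi := PySem.List.pyGetD method3_pow2 (a : Int) 0 * 1
    if gi > n then ans
    else
      let lb := method3_bs n (PySem.List.pyGetD method3_pow2 (a : Int) 0) 1 (10 ^ 9)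
      method3_outer n (a + 1) (ans + PySem.Int.floordiv (lb + 1) 2)
  else ans
termination_by 64 - a

def method_3 (n : Int) : Int := method3_outer n 1 0

-- ===== PORT B =====
-- needed by the outer-loop recursion below (guard 2*b*b ≤ n forces b ≤ n)
theorem method3_le_two_sq (b : Int) : b ≤ 2 * b * b := by
  by_cases h : b ≤ 0
  · nlinarith
  · push_neg at h
    nlinarith

-- the inner `while m > 1: m //= 2; ans += 1` loop of B
def method3alt_log (m ans : Int) : Int :=
  if h : m > 1 then method3alt_log (PySem.Int.floordiv m 2) (ans + 1) else ans
termination_by m.toNat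
decreasing_by
  rw [PySem.Int.floordiv_eq_ediv_of_pos (by omega : (0:Int) < 2)]; omega

-- the outer `while 2 * b * b <= n` loop of B over odd b
def method3alt_outer (n b ans : Int) : Int :=
  if h : 2 * b * b ≤ n then
    method3alt_outer n (b + 2) (method3alt_log (PySem.Int.floordiv n (b * b)) ans)
  else ans
termination_by (n + 1 - b).toNat
decreasing_by
  have := method3_le_two_sq b; omega

def method_3_alt (n : Int) : Int := method3alt_outer n 1 0

-- ===== PRECONDITION & SPEC =====
def Spec_method_3 (n : Int) (out : Int) : Prop := out = method_3_alt n
instance (n : Int) (out : Int) : Decidable (Spec_method_3 n out) := by unfold Spec_method_3; infer_instance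

-- ===== CLAIM (what is proved, stated in full; the proofs are below) =====
def Claim_equal_method_3 : Prop := ∀ (n : Int), Dom_method_3 n → Spec_method_3 n (method_3 n)

-- ===== LEMMAS AND PROOFS =====

-- number of odd b = 2k+1, k < n.toNat, with 2^a * b^2 ≤ n  (what A's term for exponent a counts)
def cntA (n : Int) (a : Nat) : Nat :=
  ((Finset.range n.toNat).filter (fun k : Nat => (2:Int) ^ a * ((2 * (k:Int) + 1) * (2 * (k:Int) + 1)) ≤ n)).card

-- number of exponents a ∈ [1,64) with 2^a * (2k+1)^2 ≤ n  (what B's term for base 2k+1 counts)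
def cntB (n : Int) (k : Nat) : Nat :=
  ((Finset.Ico 1 64).filter (fun a : Nat => (2:Int) ^ a * ((2 * (k:Int) + 1) * (2 * (k:Int) + 1)) ≤ n)).card

theorem sum_swap_cnt (n : Int) :
    ∑ a ∈ Finset.Ico 1 64, cntA n a = ∑ k ∈ Finset.range n.toNat, cntB n k := by
  simp only [cntA, cntB, Finset.card_filter]
  exact Finset.sum_comm

theorem pow2_get (a : Nat) (h : a < 64) :
    PySem.List.pyGetD method3_pow2 (a : Int) 0 = (2:Int) ^ a := by
  unfold method3_pow2
  rw [PySem.List.pyGetD_map_pyRange_of_nonneg _ 64 (a : Int) 0 (by omega) (by exact_mod_cast h)]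
  simp

theorem bs_char (n base : Int) (hb : 1 ≤ base) :
    ∀ d lb ub, (ub - lb).toNat ≤ d → 1 ≤ lb → lb < ub →
      base * lb * lb ≤ n → n < base * ub * ub →
      1 ≤ method3_bs n base lb ub ∧
      base * method3_bs n base lb ub * method3_bs n base lb ub ≤ n ∧
      n < base * (method3_bs n base lb ub + 1) * (method3_bs n base lb ub + 1) := by
  intro d
  induction d with
  | zero => intro lb ub hd h1 hlt _ _; omega
  | succ d ih =>
    intro lb ub hd h1 hlt hlo hhi
    by_cases hgap : ub - lb > 1
    · have hmid := method3_mid_lt hgap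
      rw [method3_bs]
      simp only [hgap, if_true, dif_pos]
      by_cases hc : base * (PySem.Int.floordiv (lb + ub) 2) * (PySem.Int.floordiv (lb + ub) 2) > n
      · simp only [hc, if_true, if_pos]
        exact ih lb (PySem.Int.floordiv (lb + ub) 2) (by omega) h1 (by omega) hlo hc
      · simp only [hc, if_false, if_neg]
        push_neg at hc
        exact ih (PySem.Int.floordiv (lb + ub) 2) ub (by omega) (by omega) (by omega) hc hhi
    · have hub : ub = lb + 1 := by omega
      rw [method3_bs]
      simp only [hgap, dif_neg, if_false]
      subst hub
      exact ⟨h1, hlo, hhi⟩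

theorem cntA_eq_zero (n : Int) (a : Nat) (h : n < (2:Int) ^ a) : cntA n a = 0 := by
  unfold cntA
  rw [Finset.card_eq_zero, Finset.filter_eq_empty_iff]
  intro k _
  have hk0 : (0:Int) ≤ (k:Int) := Int.natCast_nonneg k
  have h1 : (1:Int) ≤ ((2 * (k:Int) + 1) * (2 * (k:Int) + 1)) := by nlinarith
  have h2 : (0:Int) < 2 ^ a := by positivity
  simp only [not_le]
  nlinarith

theorem cntB_eq_zero (n : Int) (k : Nat) (h : n < 2 * ((2 * (k:Int) + 1) * (2 * (k:Int) + 1))) : cntB n k = 0 := by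
  unfold cntB
  rw [Finset.card_eq_zero, Finset.filter_eq_empty_iff]
  intro a ha
  simp only [Finset.mem_Ico] at ha
  have h2 : (2:Int) ≤ 2 ^ a := by
    calc (2:Int) = 2 ^ 1 := by norm_num
    _ ≤ 2 ^ a := pow_le_pow_right₀ (by norm_num) ha.1
  have hk0 : (0:Int) ≤ (k:Int) := Int.natCast_nonneg k
  have h1 : (0:Int) ≤ ((2 * (k:Int) + 1) * (2 * (k:Int) + 1)) := by nlinarith
  simp only [not_le]
  nlinarith

-- A's per-exponent term (lb+1)//2 equals cntA
theorem per_a (n : Int) (hn2 : 2 ≤ n) (hn : n ≤ 2 ^ 31) (a : Nat) (ha : 1 ≤ a)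
    (h2a : (2:Int) ^ a ≤ n) :
    PySem.Int.floordiv (method3_bs n ((2:Int) ^ a) 1 (10 ^ 9) + 1) 2 = (cntA n a : Int) := by
  have hbase : (2:Int) ≤ 2 ^ a := by
    calc (2:Int) = 2 ^ 1 := by norm_num
    _ ≤ 2 ^ a := pow_le_pow_right₀ (by norm_num) ha
  obtain ⟨hr1, hr2, hr3⟩ := bs_char n ((2:Int) ^ a) (by omega) 1000000000
      1 (10 ^ 9) (by norm_num) (by norm_num) (by norm_num) (by linarith) (by nlinarith)
  set r := method3_bs n ((2:Int) ^ a) 1 (10 ^ 9) with hrdef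
  have hpow : (0:Int) < 2 ^ a := by positivity
  have hrn : r ≤ n := by nlinarith
  rw [PySem.Int.floordiv_eq_ediv_of_pos (by norm_num : (0:Int) < 2)]
  have hset : (Finset.range n.toNat).filter
        (fun k : Nat => (2:Int) ^ a * ((2 * (k:Int) + 1) * (2 * (k:Int) + 1)) ≤ n)
      = Finset.range (((r + 1) / 2).toNat) := by
    ext k
    simp only [Finset.mem_filter, Finset.mem_range]
    have hk0 : (0:Int) ≤ (k:Int) := Int.natCast_nonneg k
    constructor
    · rintro ⟨_, hineq⟩
      have h1 : 2 * (k:Int) + 1 ≤ r := by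
        by_contra hc
        push_neg at hc
        have h0 : (0:Int) ≤ r + 1 := by omega
        have hle : (r + 1) * (r + 1) ≤ (2 * (k:Int) + 1) * (2 * (k:Int) + 1) := by nlinarith
        nlinarith [mul_le_mul_of_nonneg_left hle (le_of_lt hpow)]
      omega
    · intro hk
      have h1 : 2 * (k:Int) + 1 ≤ r := by omega
      refine ⟨by omega, ?_⟩
      have hle : (2 * (k:Int) + 1) * (2 * (k:Int) + 1) ≤ r * r := by nlinarith
      nlinarith [mul_le_mul_of_nonneg_left hle (le_of_lt hpow)]
  unfold cntA
  rw [hset, Finset.card_range]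
  omega

-- A's outer loop computes the sum of the cntA terms
theorem outerA (n : Int) (hn2 : 2 ≤ n) (hn : n ≤ 2 ^ 31) :
    ∀ d a ans, 64 - a ≤ d → 1 ≤ a →
      method3_outer n a ans = ans + ∑ x ∈ Finset.Ico a 64, (cntA n x : Int) := by
  intro d
  induction d with
  | zero =>
    intro a ans hd _
    have h64 : ¬ a < 64 := by omega
    rw [method3_outer]
    simp [h64, Finset.Ico_eq_empty_iff.mpr (by omega)]
  | succ d ih =>
    intro a ans hd ha
    by_cases h64 : a < 64
    · rw [method3_outer]
      simp only [h64, dif_pos, pow2_get a h64, mul_one]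
      by_cases hbr : (2:Int) ^ a > n
      · simp only [hbr, if_true, if_pos]
        have hz : ∑ x ∈ Finset.Ico a 64, (cntA n x : Int) = 0 := by
          apply Finset.sum_eq_zero
          intro x hx
          simp only [Finset.mem_Ico] at hx
          have : (2:Int) ^ a ≤ 2 ^ x := pow_le_pow_right₀ (by norm_num) hx.1
          rw [cntA_eq_zero n x (by omega)]
          norm_num
        omega
      · simp only [hbr, if_false, if_neg]
        push_neg at hbr
        rw [ih (a + 1) _ (by omega) (by omega)]
        rw [Finset.sum_eq_sum_Ico_succ_bot h64]
        rw [per_a n hn2 hn a ha hbr]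
        ring
    · rw [method3_outer]
      simp [h64, Finset.Ico_eq_empty_iff.mpr (by omega)]

-- count of valid exponents as a Nat.log
theorem count_eq_log (m : Int) (h1 : 1 ≤ m) (h2 : m ≤ 2 ^ 31) :
    ((Finset.Ico 1 64).filter (fun a : Nat => (2:Int) ^ a ≤ m)).card = Nat.log 2 m.toNat := by
  have hlog : Nat.log 2 m.toNat ≤ 31 := by
    calc Nat.log 2 m.toNat ≤ Nat.log 2 (2 ^ 31) := Nat.log_mono_right (by omega)
    _ = 31 := Nat.log_pow (by norm_num) 31
  have hset : (Finset.Ico 1 64).filter (fun a : Nat => (2:Int) ^ a ≤ m)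
      = Finset.Icc 1 (Nat.log 2 m.toNat) := by
    ext a
    simp only [Finset.mem_filter, Finset.mem_Ico, Finset.mem_Icc]
    have hcast : ((2:Int) ^ a ≤ m) ↔ ((2:Nat) ^ a ≤ m.toNat) := by
      rw [show ((2:Int) ^ a) = (((2:Nat) ^ a : Nat) : Int) by push_cast; ring]
      exact (Int.le_toNat (by omega : (0:Int) ≤ m)).symm
    rw [hcast]
    rw [Nat.pow_le_iff_le_log (by norm_num) (by omega)]
    omega
  rw [hset, Nat.card_Icc]
  omega

-- B's inner halving loop adds Nat.log 2 m
theorem logloop_eq : ∀ d (m ans : Int), m.toNat ≤ d → 1 ≤ m → m ≤ 2 ^ 31 →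
    method3alt_log m ans = ans + (Nat.log 2 m.toNat : Int) := by
  intro d
  induction d with
  | zero => intro m ans hd h1 _; omega
  | succ d ih =>
    intro m ans hd h1 h2
    by_cases hm : m > 1
    · rw [method3alt_log]
      simp only [hm, dif_pos]
      rw [PySem.Int.floordiv_eq_ediv_of_pos (by norm_num : (0:Int) < 2)]
      rw [ih (m / 2) (ans + 1) (by omega) (by omega) (by omega)]
      have hdiv : (m / 2).toNat = m.toNat / 2 := by omega
      have hrec : Nat.log 2 m.toNat = Nat.log 2 (m.toNat / 2) + 1 := by
        have hp : 0 < Nat.log 2 m.toNat := Nat.log_pos (by norm_num) (by omega)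
        have := Nat.log_div_base 2 m.toNat
        omega
      rw [hdiv, hrec]
      push_cast
      ring
    · rw [method3alt_log]
      simp only [hm, dif_neg]
      have hm1 : m = 1 := by omega
      subst hm1
      norm_num
theorem cntB_eq_log (n : Int) (hn : n ≤ 2 ^ 31) (k : Nat)
    (hg : 2 * (2 * (k:Int) + 1) * (2 * (k:Int) + 1) ≤ n) :
    (cntB n k : Int) = (Nat.log 2 (PySem.Int.floordiv n ((2 * (k:Int) + 1) * (2 * (k:Int) + 1))).toNat : Int) := by
  have hbpos : (0:Int) < (2 * (k:Int) + 1) * (2 * (k:Int) + 1) := by positivity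
  rw [PySem.Int.floordiv_eq_ediv_of_pos hbpos]
  set b2 : Int := (2 * (k:Int) + 1) * (2 * (k:Int) + 1) with hb2
  have hg' : 2 * b2 ≤ n := by rw [hb2, ← mul_assoc]; exact hg
  have hm2 : 2 ≤ n / b2 := (Int.le_ediv_iff_mul_le hbpos).mpr hg'
  have hmle : n / b2 ≤ n := Int.ediv_le_self b2 (by linarith)
  have hset : (Finset.Ico 1 64).filter
        (fun a : Nat => (2:Int) ^ a * ((2 * (k:Int) + 1) * (2 * (k:Int) + 1)) ≤ n)
      = (Finset.Ico 1 64).filter (fun a : Nat => (2:Int) ^ a ≤ n / b2) := by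
    apply Finset.filter_congr
    intro a _
    rw [Int.le_ediv_iff_mul_le hbpos, hb2]
  unfold cntB
  rw [hset, count_eq_log (n / b2) (by linarith) (by linarith)]

-- B's outer loop computes the sum of the cntB terms
theorem outerB (n : Int) (hn2 : 2 ≤ n) (hn : n ≤ 2 ^ 31) :
    ∀ d (k : Nat) ans, n.toNat - k ≤ d →
      method3alt_outer n (2 * (k:Int) + 1) ans
        = ans + ∑ x ∈ Finset.Ico k n.toNat, (cntB n x : Int) := by
  intro d
  induction d with
  | zero =>
    intro k ans hd
    have hk : n.toNat ≤ k := by omega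
    have hkn : (n:Int) ≤ 2 * (k:Int) := by
      have h2 : (n.toNat : Int) ≤ (k : Int) := by exact_mod_cast hk
      omega
    have hsq := method3_le_two_sq (2 * (k:Int) + 1)
    have hguard : ¬ 2 * (2 * (k:Int) + 1) * (2 * (k:Int) + 1) ≤ n := by
      intro hcon; linarith
    rw [method3alt_outer]
    simp [hguard, Finset.Ico_eq_empty_iff.mpr (by omega : ¬ k < n.toNat)]
  | succ d ih =>
    intro k ans hd
    by_cases hguard : 2 * (2 * (k:Int) + 1) * (2 * (k:Int) + 1) ≤ n
    · have hsq := method3_le_two_sq (2 * (k:Int) + 1)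
      have hk0 : (0:Int) ≤ (k:Int) := Int.natCast_nonneg k
      have hkK : k < n.toNat := by
        have : 2 * (k:Int) + 1 ≤ n := by linarith
        omega
      rw [method3alt_outer]
      simp only [hguard, dif_pos]
      have hstep : (2 * (k:Int) + 1) + 2 = 2 * (((k + 1 : Nat)):Int) + 1 := by push_cast; ring
      rw [hstep, ih (k + 1) _ (by omega)]
      have hbpos : (0:Int) < (2 * (k:Int) + 1) * (2 * (k:Int) + 1) := by positivity
      have hg' : 2 * ((2 * (k:Int) + 1) * (2 * (k:Int) + 1)) ≤ n := by
        rw [← mul_assoc]; exact hguard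
      have hm2 : 2 ≤ n / ((2 * (k:Int) + 1) * (2 * (k:Int) + 1)) :=
        (Int.le_ediv_iff_mul_le hbpos).mpr hg'
      have hmle : n / ((2 * (k:Int) + 1) * (2 * (k:Int) + 1)) ≤ n :=
        Int.ediv_le_self _ (by linarith)
      have hfd : PySem.Int.floordiv n ((2 * (k:Int) + 1) * (2 * (k:Int) + 1))
          = n / ((2 * (k:Int) + 1) * (2 * (k:Int) + 1)) :=
        PySem.Int.floordiv_eq_ediv_of_pos hbpos
      have hlog := logloop_eq (n / ((2 * (k:Int) + 1) * (2 * (k:Int) + 1))).toNat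
        (PySem.Int.floordiv n ((2 * (k:Int) + 1) * (2 * (k:Int) + 1))) ans
        (by rw [hfd]) (by rw [hfd]; linarith) (by rw [hfd]; linarith)
      rw [hlog, Finset.sum_eq_sum_Ico_succ_bot hkK, cntB_eq_log n hn k hguard]
      ring
    · rw [method3alt_outer]
      simp only [hguard, dif_neg, not_false_iff]
      have hz : ∑ x ∈ Finset.Ico k n.toNat, (cntB n x : Int) = 0 := by
        apply Finset.sum_eq_zero
        intro x hx
        simp only [Finset.mem_Ico] at hx
        have hk0 : (0:Int) ≤ (k:Int) := Int.natCast_nonneg k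
        have hkx : (k:Int) ≤ (x:Int) := by exact_mod_cast hx.1
        push_neg at hguard
        have hmono : 2 * ((2 * (k:Int) + 1) * (2 * (k:Int) + 1))
            ≤ 2 * ((2 * (x:Int) + 1) * (2 * (x:Int) + 1)) := by nlinarith
        rw [cntB_eq_zero n x (by nlinarith)]
        norm_num
      omega

-- ===== VERDICT (by name: the statement is the Claim_ definition above) =====
theorem method_3_spec : Claim_equal_method_3 := by
  intro n hdom
  have hn : -2147483648 ≤ n ∧ n ≤ 2147483648 := by
    simpa [Dom_method_3, pvDomInt] using hdom
  show method_3 n = method_3_alt n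
  by_cases hsmall : n < 2
  · have hget : PySem.List.pyGetD method3_pow2 ((1:Nat) : Int) 0 = (2:Int) := by
      simpa using pow2_get 1 (by norm_num)
    rw [method_3, method3_outer, method_3_alt, method3alt_outer]
    rw [dif_pos (by norm_num : (1:Nat) < 64)]
    rw [dif_neg (by omega : ¬ (2:Int) * 1 * 1 ≤ n)]
    rw [if_pos]
    rw [hget]
    omega
  · push_neg at hsmall
    have hn31 : n ≤ 2 ^ 31 := by omega
    rw [method_3, method_3_alt]
    rw [outerA n hsmall hn31 64 1 0 (by omega) (by omega)]
    rw [show (1:Int) = 2 * (((0:Nat)):Int) + 1 by norm_num]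
    rw [outerB n hsmall hn31 n.toNat 0 0 (by omega)]
    have hsw := sum_swap_cnt n
    rw [Finset.range_eq_Ico] at hsw
    have : (∑ a ∈ Finset.Ico 1 64, (cntA n a : Int)) = ∑ k ∈ Finset.Ico 0 n.toNat, (cntB n k : Int) := by
      exact_mod_cast congrArg (Nat.cast : Nat → Int) hsw
    omega
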